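-- pv_equiv track=rewrite | github.com/nadiaadhami/python_splitString | splitString.py | splitToTwoWords
-- ===== SOURCE A (Python) =====
-- dict = {"a","rock","star","tar","zebra","google"}
--
-- def splitToTwoWords(word):
--     words = set()
--     if len(word)  == 0:
--         return words
--     if len(word) == 1:
--         if word in dict:
--             words.add(word)
--             return words
--     for i in range(0,len(word)):
--         s1 = word[0:i+1]
--         s2 = word[i+1:]
--         if s1 in dict and s2 in dict:
--             words.add(s1)
--             words.add(s2)
--             break
--     return words
-- ===== SOURCE B (Python) =====
-- dict = {"a", "rock", "star", "tar", "zebra", "google"}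
--
-- _LENS = (1, 3, 4, 5, 6)  # the distinct lengths of dictionary words, increasing
--
-- def splitToTwoWords(word):
--     n = len(word)
--     if n == 1 and word in dict:
--         return {word}
--     # a split point can only succeed where the prefix has a dictionary-word length
--     for L in _LENS:
--         if L < n and word[:L] in dict and word[L:] in dict:
--             return {word[:L], word[L:]}
--     return set()
-- ===== Notes on version B (the rewrite author's own statement) =====
-- stated objective: faster
-- what changed: Instead of trying every split index 0..len(word)-1, B only tests the five split lengths that equal a dictionary-word length (1,3,4,5,6), in increasing order, so the scan is a constant number of prefix/suffix checks.
import Mathlib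
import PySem

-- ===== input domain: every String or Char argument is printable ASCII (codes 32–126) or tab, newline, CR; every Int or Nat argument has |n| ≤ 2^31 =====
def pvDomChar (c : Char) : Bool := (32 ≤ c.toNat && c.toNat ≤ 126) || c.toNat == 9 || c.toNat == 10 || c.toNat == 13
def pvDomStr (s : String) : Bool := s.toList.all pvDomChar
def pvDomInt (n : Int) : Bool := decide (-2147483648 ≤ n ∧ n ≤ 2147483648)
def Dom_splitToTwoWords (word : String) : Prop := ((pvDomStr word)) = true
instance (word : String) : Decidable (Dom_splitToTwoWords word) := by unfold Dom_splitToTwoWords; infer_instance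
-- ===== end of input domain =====

-- B replaces A's scan over every split index by a scan over the five dictionary-word lengths only.

-- ===== PORT A =====
-- module constant: dict = {"a","rock","star","tar","zebra","google"}
def pyDict : PySem.Set String := PySem.Set.ofList ["a", "rock", "star", "tar", "zebra", "google"]

-- 'for i in range(0, len(word)): s1 = word[0:i+1]; s2 = word[i+1:]; if s1 in dict and s2 in dict: add both; break'
def loopA (cs : List Char) (idxs : List Int) (words : PySem.Set String) : PySem.Set String :=
  match idxs with
  | [] => words
  | i :: rest =>
    let s1 := String.ofList (PySem.List.slice cs (some 0) (some (i + 1)))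
    let s2 := String.ofList (PySem.List.slice cs (some (i + 1)) none)
    if PySem.Set.contains pyDict s1 && PySem.Set.contains pyDict s2 then
      PySem.Set.add (PySem.Set.add words s1) s2
    else loopA cs rest words

def splitToTwoWords (word : String) : List String :=
  let words : PySem.Set String := PySem.Set.empty
  if PySem.Str.len word = 0 then words
  else if PySem.Str.len word = 1 ∧ PySem.Set.contains pyDict word = true then
    PySem.Set.add words word
  else loopA word.toList (PySem.List.pyRange 0 (PySem.Str.len word) 1) words

-- ===== PORT B =====
-- Source B's 'for L in _LENS: if L < n and word[:L] in dict and word[L:] in dict: return {word[:L], word[L:]}'.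
-- word[:L] / word[L:] with the natural number L are exactly List.take L / List.drop L
-- (PySem.List.slice_to_natCast / slice_from_natCast).
def loopB (cs : List Char) (lens : List Nat) : List String :=
  match lens with
  | [] => []
  | L :: rest =>
    if L < cs.length then
      let s1 := String.ofList (cs.take L)
      let s2 := String.ofList (cs.drop L)
      if PySem.Set.contains pyDict s1 && PySem.Set.contains pyDict s2 then
        PySem.Set.ofList [s1, s2]
      else loopB cs rest
    else loopB cs rest

def splitToTwoWords_alt (word : String) : List String :=
  let cs := word.toList
  if cs.length = 1 ∧ PySem.Set.contains pyDict word = true then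
    PySem.Set.ofList [word]
  else loopB cs [1, 3, 4, 5, 6]

-- ===== PRECONDITION & SPEC =====
def Spec_splitToTwoWords (word : String) (out : List String) : Prop := out = splitToTwoWords_alt word
instance (word : String) (out : List String) : Decidable (Spec_splitToTwoWords word out) := by unfold Spec_splitToTwoWords; infer_instance

-- ===== CLAIM (what is proved, stated in full; the proofs are below) =====
def Claim_equal_splitToTwoWords : Prop := ∀ (word : String), Dom_splitToTwoWords word → Spec_splitToTwoWords word (splitToTwoWords word)

-- ===== LEMMAS AND PROOFS =====

-- membership in the dictionary forces the word's length to be 1, 3, 4, 5 or 6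
lemma notin_of_len (s : String)
    (h : ¬ (s.toList.length = 1 ∨ s.toList.length = 3 ∨ s.toList.length = 4 ∨
            s.toList.length = 5 ∨ s.toList.length = 6)) :
    PySem.Set.contains pyDict s = false := by
  by_contra hc
  have hm : s ∈ pyDict := (PySem.Set.contains_iff _ _).mp (by
    cases hcc : PySem.Set.contains pyDict s
    · exact absurd hcc hc
    · rfl)
  have hd : pyDict = ["a", "rock", "star", "tar", "zebra", "google"] := by decide
  rw [hd] at hm
  simp only [List.mem_cons, List.not_mem_nil, or_false] at hm
  rcases hm with rfl | rfl | rfl | rfl | rfl | rfl <;> exact h (by decide)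

-- past index 5 A's loop can never fire: the prefix is longer than every dictionary word
lemma loopA_tail (cs : List Char) (k : Nat) :
    ∀ (a : Int) (w : PySem.Set String), 6 ≤ a → ((cs.length : Int) - a).toNat = k →
      loopA cs (PySem.List.pyRange a (cs.length : Int) 1) w = w := by
  induction k with
  | zero =>
    intro a w h6 hk
    rw [PySem.List.pyRange_one_eq_nil (by omega)]
    rfl
  | succ k ih =>
    intro a w h6 hk
    by_cases hab : a < (cs.length : Int)
    · rw [PySem.List.pyRange_one_cons hab]
      have ha1 : a + 1 = ((a.toNat + 1 : Nat) : Int) := by omega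
      have hc : PySem.Set.contains pyDict
          (String.ofList (PySem.List.slice cs (some 0) (some (a + 1)))) = false := by
        apply notin_of_len
        rw [ha1]
        have : PySem.List.slice cs (some ((0 : Nat) : Int)) (some ((a.toNat + 1 : Nat) : Int)) =
            (cs.drop 0).take (a.toNat + 1 - 0) := PySem.List.slice_natCast cs 0 (a.toNat + 1)
        simp only [Nat.cast_zero] at this
        rw [this]
        simp only [List.drop_zero, Nat.sub_zero, String.toList_ofList, List.length_take]
        omega
      simp only [loopA, hc, Bool.false_and, Bool.false_eq_true, if_false]
      exact ih (a + 1) w (by omega) (by omega)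
    · rw [PySem.List.pyRange_one_eq_nil (by omega)]
      rfl

-- if the tail of the index list can never fire, it can be dropped
lemma loopA_append_triv (cs : List Char) (xs ys : List Int)
    (h : ∀ w, loopA cs ys w = w) :
    ∀ w, loopA cs (xs ++ ys) w = loopA cs xs w := by
  induction xs with
  | nil => intro w; simpa using h w
  | cons i rest ih =>
    intro w
    simp only [List.cons_append, loopA]
    split
    · rfl
    · exact ih w

-- Python's {s1, s2} is the empty set with s1 then s2 inserted (definitional)
lemma ofList_pair (s1 s2 : String) :
    PySem.Set.ofList [s1, s2] = PySem.Set.add (PySem.Set.add PySem.Set.empty s1) s2 := rfl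

set_option maxHeartbeats 2000000 in
lemma split_eq_big (word : String) (h7 : 7 ≤ word.toList.length) :
    splitToTwoWords word = splitToTwoWords_alt word := by
  unfold splitToTwoWords splitToTwoWords_alt
  simp only [PySem.Str.len_eq]
  rw [if_neg (by omega), if_neg (by rintro ⟨h1, -⟩; omega), if_neg (by rintro ⟨h1, -⟩; omega)]
  rw [PySem.List.pyRange_one_append 0 6 (word.toList.length : Int) (by omega) (by omega)]
  have htail : ∀ w, loopA word.toList (PySem.List.pyRange 6 (word.toList.length : Int) 1) w = w :=
    fun w => loopA_tail word.toList _ 6 w (by omega) rfl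
  rw [loopA_append_triv _ _ _ htail]
  rw [show PySem.List.pyRange 0 6 1 = [0, 1, 2, 3, 4, 5] from by decide]
  have hc2 : pyDict.contains (String.ofList (word.toList.take 2)) = false :=
    notin_of_len _ (by simp only [String.toList_ofList, List.length_take]; omega)
  have a1 : PySem.List.slice word.toList (some 0) (some 1) = word.toList.take 1 := by simp [pysem]
  have a2 : PySem.List.slice word.toList (some 0) (some 2) = word.toList.take 2 := by simp [pysem]
  have a3 : PySem.List.slice word.toList (some 0) (some 3) = word.toList.take 3 := by simp [pysem]
  have a4 : PySem.List.slice word.toList (some 0) (some 4) = word.toList.take 4 := by simp [pysem]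
  have a5 : PySem.List.slice word.toList (some 0) (some 5) = word.toList.take 5 := by simp [pysem]
  have a6 : PySem.List.slice word.toList (some 0) (some 6) = word.toList.take 6 := by simp [pysem]
  have d1 : PySem.List.slice word.toList (some 1) none = word.toList.drop 1 := by simp [pysem]
  have d2 : PySem.List.slice word.toList (some 2) none = word.toList.drop 2 := by simp [pysem]
  have d3 : PySem.List.slice word.toList (some 3) none = word.toList.drop 3 := by simp [pysem]
  have d4 : PySem.List.slice word.toList (some 4) none = word.toList.drop 4 := by simp [pysem]
  have d5 : PySem.List.slice word.toList (some 5) none = word.toList.drop 5 := by simp [pysem]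
  have d6 : PySem.List.slice word.toList (some 6) none = word.toList.drop 6 := by simp [pysem]
  simp only [loopA, loopB, ofList_pair, Int.reduceAdd]
  rw [if_pos (show 1 < word.toList.length by omega), if_pos (show 3 < word.toList.length by omega),
    if_pos (show 4 < word.toList.length by omega), if_pos (show 5 < word.toList.length by omega),
    if_pos (show 6 < word.toList.length by omega)]
  simp only [a1, a2, a3, a4, a5, a6, d1, d2, d3, d4, d5, d6]
  simp only [hc2, Bool.false_and, Bool.false_eq_true, if_false]
  rfl

set_option maxHeartbeats 2000000 in
lemma split_eq_small (word : String) (h7 : word.toList.length ≤ 6) :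
    splitToTwoWords word = splitToTwoWords_alt word := by
  unfold splitToTwoWords splitToTwoWords_alt
  simp only [PySem.Str.len_eq]
  obtain ⟨n, hn⟩ : ∃ n, word.toList.length = n := ⟨_, rfl⟩
  rw [hn] at h7
  have hdrop : word.toList.drop n = [] := by rw [← hn]; exact List.drop_length
  have hcnil : pyDict.contains (String.ofList ([] : List Char)) = false := by decide
  have hc2 : 2 ≤ n → pyDict.contains (String.ofList (word.toList.take 2)) = false := fun hge =>
    notin_of_len _ (by simp only [String.toList_ofList, List.length_take]; omega)
  have a1 : PySem.List.slice word.toList (some 0) (some 1) = word.toList.take 1 := by simp [pysem]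
  have a2 : PySem.List.slice word.toList (some 0) (some 2) = word.toList.take 2 := by simp [pysem]
  have a3 : PySem.List.slice word.toList (some 0) (some 3) = word.toList.take 3 := by simp [pysem]
  have a4 : PySem.List.slice word.toList (some 0) (some 4) = word.toList.take 4 := by simp [pysem]
  have a5 : PySem.List.slice word.toList (some 0) (some 5) = word.toList.take 5 := by simp [pysem]
  have a6 : PySem.List.slice word.toList (some 0) (some 6) = word.toList.take 6 := by simp [pysem]
  have d1 : PySem.List.slice word.toList (some 1) none = word.toList.drop 1 := by simp [pysem]
  have d2 : PySem.List.slice word.toList (some 2) none = word.toList.drop 2 := by simp [pysem]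
  have d3 : PySem.List.slice word.toList (some 3) none = word.toList.drop 3 := by simp [pysem]
  have d4 : PySem.List.slice word.toList (some 4) none = word.toList.drop 4 := by simp [pysem]
  have d5 : PySem.List.slice word.toList (some 5) none = word.toList.drop 5 := by simp [pysem]
  have d6 : PySem.List.slice word.toList (some 6) none = word.toList.drop 6 := by simp [pysem]
  interval_cases n
  · simp only [hn, Nat.cast_zero]
    simp [loopB, hn]
  · rw [if_neg (by simp [hn])]
    by_cases hw : pyDict.contains word = true
    · rw [if_pos ⟨by simp [hn], hw⟩, if_pos ⟨hn, hw⟩]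
      rfl
    · rw [if_neg (fun h => hw h.2), if_neg (fun h => hw h.2)]
      simp only [hn, Nat.cast_one]
      rw [show PySem.List.pyRange 0 1 1 = [0] from by decide]
      simp only [loopA, loopB, ofList_pair, Int.reduceAdd]
      rw [if_neg (show ¬ 1 < word.toList.length by omega), if_neg (show ¬ 3 < word.toList.length by omega),
        if_neg (show ¬ 4 < word.toList.length by omega), if_neg (show ¬ 5 < word.toList.length by omega),
        if_neg (show ¬ 6 < word.toList.length by omega)]
      simp only [a1, d1, hdrop]
      simp only [hcnil, Bool.and_false, Bool.false_eq_true, if_false]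
      rfl
  · simp only [hn, Nat.cast_ofNat]
    rw [if_neg (by norm_num), if_neg (by norm_num), if_neg (by norm_num)]
    rw [show PySem.List.pyRange 0 2 1 = [0, 1] from by decide]
    simp only [loopA, loopB, ofList_pair, Int.reduceAdd]
    rw [if_pos (show 1 < word.toList.length by omega), if_neg (show ¬ 3 < word.toList.length by omega),
      if_neg (show ¬ 4 < word.toList.length by omega), if_neg (show ¬ 5 < word.toList.length by omega),
      if_neg (show ¬ 6 < word.toList.length by omega)]
    simp only [a1, a2, d1, d2, hdrop]
    simp only [hcnil, Bool.and_false, Bool.false_eq_true, if_false]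
    rfl
  · simp only [hn, Nat.cast_ofNat]
    rw [if_neg (by norm_num), if_neg (by norm_num), if_neg (by norm_num)]
    rw [show PySem.List.pyRange 0 3 1 = [0, 1, 2] from by decide]
    simp only [loopA, loopB, ofList_pair, Int.reduceAdd]
    rw [if_pos (show 1 < word.toList.length by omega), if_neg (show ¬ 3 < word.toList.length by omega),
      if_neg (show ¬ 4 < word.toList.length by omega), if_neg (show ¬ 5 < word.toList.length by omega),
      if_neg (show ¬ 6 < word.toList.length by omega)]
    simp only [a1, a2, a3, d1, d2, d3, hdrop]
    simp only [hc2 (by omega), hcnil, Bool.false_and, Bool.and_false, Bool.false_eq_true, if_false]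
    rfl
  · simp only [hn, Nat.cast_ofNat]
    rw [if_neg (by norm_num), if_neg (by norm_num), if_neg (by norm_num)]
    rw [show PySem.List.pyRange 0 4 1 = [0, 1, 2, 3] from by decide]
    simp only [loopA, loopB, ofList_pair, Int.reduceAdd]
    rw [if_pos (show 1 < word.toList.length by omega), if_pos (show 3 < word.toList.length by omega),
      if_neg (show ¬ 4 < word.toList.length by omega), if_neg (show ¬ 5 < word.toList.length by omega),
      if_neg (show ¬ 6 < word.toList.length by omega)]
    simp only [a1, a2, a3, a4, d1, d2, d3, d4, hdrop]
    simp only [hc2 (by omega), hcnil, Bool.false_and, Bool.and_false, Bool.false_eq_true, if_false]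
    rfl
  · simp only [hn, Nat.cast_ofNat]
    rw [if_neg (by norm_num), if_neg (by norm_num), if_neg (by norm_num)]
    rw [show PySem.List.pyRange 0 5 1 = [0, 1, 2, 3, 4] from by decide]
    simp only [loopA, loopB, ofList_pair, Int.reduceAdd]
    rw [if_pos (show 1 < word.toList.length by omega), if_pos (show 3 < word.toList.length by omega),
      if_pos (show 4 < word.toList.length by omega), if_neg (show ¬ 5 < word.toList.length by omega),
      if_neg (show ¬ 6 < word.toList.length by omega)]
    simp only [a1, a2, a3, a4, a5, d1, d2, d3, d4, d5, hdrop]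
    simp only [hc2 (by omega), hcnil, Bool.false_and, Bool.and_false, Bool.false_eq_true, if_false]
    rfl
  · simp only [hn, Nat.cast_ofNat]
    rw [if_neg (by norm_num), if_neg (by norm_num), if_neg (by norm_num)]
    rw [show PySem.List.pyRange 0 6 1 = [0, 1, 2, 3, 4, 5] from by decide]
    simp only [loopA, loopB, ofList_pair, Int.reduceAdd]
    rw [if_pos (show 1 < word.toList.length by omega), if_pos (show 3 < word.toList.length by omega),
      if_pos (show 4 < word.toList.length by omega), if_pos (show 5 < word.toList.length by omega),
      if_neg (show ¬ 6 < word.toList.length by omega)]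
    simp only [a1, a2, a3, a4, a5, a6, d1, d2, d3, d4, d5, d6, hdrop]
    simp only [hc2 (by omega), hcnil, Bool.false_and, Bool.and_false, Bool.false_eq_true, if_false]
    rfl

-- ===== VERDICT (by name: the statement is the Claim_ definition above) =====
theorem splitToTwoWords_spec : Claim_equal_splitToTwoWords := by
  intro word _
  unfold Spec_splitToTwoWords
  by_cases h : 7 ≤ word.toList.length
  · exact split_eq_big word h
  · exact split_eq_small word (by omega)
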